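-- pv_equiv track=rewrite | github.com/nicoaira/GINFINITY | src/ginfinity/scripts/embed_msa.py | _dotbracket_to_pairs
-- ===== SOURCE A (Python) =====
-- from typing import Any, Dict, Iterable, List, Optional, Sequence, Tuple
--
-- def _dotbracket_to_pairs(db: str) -> List[int]:
--     # Simple stack-based pairing for (), [] , {}
--     L = len(db)
--     pairs = [-1] * L
--     stacks = {"(": [], "[": [], "{": []}
--     mates = {")": "(", "]": "[", "}": "{",
--     }
--     for i, ch in enumerate(db):
--         if ch in stacks:
--             stacks[ch].append(i)
--         elif ch in mates:
--             op = mates[ch]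
--             if stacks[op]:
--                 j = stacks[op].pop()
--                 pairs[i] = j
--                 pairs[j] = i
--     return pairs
-- ===== SOURCE B (Python) =====
-- def _match(db, open_ch, close_ch, pairs):
--     # one single-bracket-type pass; records mutual pairings into the shared list
--     stack = []
--     for i, ch in enumerate(db):
--         if ch == open_ch:
--             stack.append(i)
--         elif ch == close_ch and stack:
--             j = stack.pop()
--             pairs[i] = j
--             pairs[j] = i
--
-- def _dotbracket_to_pairs(db):
--     pairs = [-1] * len(db)
--     for o, c in (("(", ")"), ("[", "]"), ("{", "}")):
--         _match(db, o, c, pairs)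
--     return pairs
-- ===== Notes on version B (the rewrite author's own statement) =====
-- stated objective: alternative
-- what changed: Replaced the single interleaved scan maintaining three stacks with three independent single-bracket-type passes (a helper called once per bracket class), each keeping one stack and writing into a shared pairs list.
import Mathlib
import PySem

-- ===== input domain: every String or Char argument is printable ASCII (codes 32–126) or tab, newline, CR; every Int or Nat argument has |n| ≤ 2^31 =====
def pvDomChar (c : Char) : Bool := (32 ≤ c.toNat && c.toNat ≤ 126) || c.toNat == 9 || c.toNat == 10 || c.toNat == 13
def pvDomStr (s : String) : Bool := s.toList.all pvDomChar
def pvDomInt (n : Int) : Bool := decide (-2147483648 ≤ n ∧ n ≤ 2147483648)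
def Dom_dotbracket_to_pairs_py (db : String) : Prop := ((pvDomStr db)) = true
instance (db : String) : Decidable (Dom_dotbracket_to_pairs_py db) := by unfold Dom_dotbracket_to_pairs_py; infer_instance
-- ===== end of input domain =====

-- B replaces A's single three-stack scan by three independent single-bracket-type passes
-- over a shared pairs list (objective: alternative decomposition; same cost).

-- ===== PORT A =====
-- A's one loop over (i, ch): three stacks (for '(', '[', '{'), push the index on an
-- opener, on a closer pop the matching stack if non-empty and record the mutual pair.
-- Python list append/pop at the end = cons/head here (same LIFO order, same values).
def goA : List Char → Nat → List Int → List Nat → List Nat → List Nat → List Int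
  | [], _, p, _, _, _ => p
  | ch :: cs, i, p, s1, s2, s3 =>
    if ch = '(' then goA cs (i+1) p (i :: s1) s2 s3
    else if ch = '[' then goA cs (i+1) p s1 (i :: s2) s3
    else if ch = '{' then goA cs (i+1) p s1 s2 (i :: s3)
    else if ch = ')' then
      match s1 with
      | [] => goA cs (i+1) p [] s2 s3
      | j :: s' => goA cs (i+1) ((p.set i (j : Int)).set j (i : Int)) s' s2 s3
    else if ch = ']' then
      match s2 with
      | [] => goA cs (i+1) p s1 [] s3
      | j :: s' => goA cs (i+1) ((p.set i (j : Int)).set j (i : Int)) s1 s' s3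
    else if ch = '}' then
      match s3 with
      | [] => goA cs (i+1) p s1 s2 []
      | j :: s' => goA cs (i+1) ((p.set i (j : Int)).set j (i : Int)) s1 s2 s'
    else goA cs (i+1) p s1 s2 s3

def dotbracket_to_pairs_py (db : String) : List Int :=
  goA db.toList 0 (List.replicate db.toList.length (-1 : Int)) [] [] []

-- ===== PORT B =====
-- B's helper _match: one pass handling a single (open, close) bracket type with one stack,
-- writing the mutual pairing into the shared pairs list.
def matchPass (o c : Char) : List Char → Nat → List Int → List Nat → List Int
  | [], _, p, _ => p
  | ch :: cs, i, p, s =>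
    if ch = o then matchPass o c cs (i+1) p (i :: s)
    else if ch = c then
      match s with
      | [] => matchPass o c cs (i+1) p []
      | j :: s' => matchPass o c cs (i+1) ((p.set i (j : Int)).set j (i : Int)) s'
    else matchPass o c cs (i+1) p s

def dotbracket_to_pairs_py_alt (db : String) : List Int :=
  let cs := db.toList
  matchPass '{' '}' cs 0
    (matchPass '[' ']' cs 0
      (matchPass '(' ')' cs 0 (List.replicate cs.length (-1 : Int)) []) []) []

-- ===== PRECONDITION & SPEC =====
def Spec_dotbracket_to_pairs_py (db : String) (out : List Int) : Prop := out = dotbracket_to_pairs_py_alt db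
instance (db : String) (out : List Int) : Decidable (Spec_dotbracket_to_pairs_py db out) := by unfold Spec_dotbracket_to_pairs_py; infer_instance

-- ===== CLAIM (what is proved, stated in full; the proofs are below) =====
def Claim_equal_dotbracket_to_pairs_py : Prop := ∀ (db : String), Dom_dotbracket_to_pairs_py db → Spec_dotbracket_to_pairs_py db (dotbracket_to_pairs_py db)

-- ===== LEMMAS AND PROOFS =====

-- small facts about stacks of indices below the current position
theorem pvConsLt {s : List Nat} {i : Nat} (h : ∀ x ∈ s, x < i) : ∀ x ∈ i :: s, x < i + 1 := by
  intro x hx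
  rcases List.mem_cons.1 hx with h' | h'
  · omega
  · exact Nat.lt_succ_of_lt (h x h')

theorem pvTailLt {s : List Nat} {i : Nat} (h : ∀ x ∈ s, x < i) : ∀ x ∈ s, x < i + 1 :=
  fun x hx => Nat.lt_succ_of_lt (h x hx)

theorem pvSelfNotMem {s : List Nat} {i : Nat} (h : ∀ x ∈ s, x < i) : i ∉ s :=
  fun hin => absurd (h i hin) (lt_irrefl i)

theorem pvNotMemCons {s t : List Nat} {i : Nat} (hlt : ∀ x ∈ t, x < i)
    (hd : ∀ x ∈ t, x ∉ s) : ∀ x ∈ t, x ∉ i :: s := by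
  intro x hx hc
  rcases List.mem_cons.1 hc with h' | h'
  · subst h'; exact absurd (hlt x hx) (lt_irrefl x)
  · exact hd x hx h'

theorem pvConsNotMem {s t : List Nat} {i : Nat} (hi : i ∉ t) (hd : ∀ x ∈ s, x ∉ t) :
    ∀ x ∈ i :: s, x ∉ t := by
  intro x hx
  rcases List.mem_cons.1 hx with h' | h'
  · exact h' ▸ hi
  · exact hd x h'

-- A set at a position strictly below the pass's start index and outside its stack
-- commutes with a whole matchPass (the pass never writes that position).
theorem matchPass_set_comm (o c : Char) (cs : List Char) : ∀ (i : Nat) (p : List Int)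
    (s : List Nat) (a : Nat) (v : Int), a < i → a ∉ s →
    matchPass o c cs i (p.set a v) s = (matchPass o c cs i p s).set a v := by
  induction cs with
  | nil => intro i p s a v _ _; simp [matchPass]
  | cons ch cs ih =>
    intro i p s a v ha hs
    by_cases h1 : ch = o
    · simp only [matchPass, if_pos h1]
      refine ih (i+1) p (i :: s) a v (Nat.lt_succ_of_lt ha) ?_
      intro hc
      rcases List.mem_cons.1 hc with h' | h'
      · exact absurd (h' ▸ ha) (lt_irrefl i)
      · exact hs h'
    · by_cases h2 : ch = c
      · cases s with
        | nil =>
          simp only [matchPass, if_neg h1, if_pos h2]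
          exact ih (i+1) p [] a v (Nat.lt_succ_of_lt ha) (by simp)
        | cons j s' =>
          have haj : a ≠ j := fun h => hs (h ▸ List.mem_cons_self ..)
          have hs' : a ∉ s' := fun h => hs (List.mem_cons_of_mem _ h)
          simp only [matchPass, if_neg h1, if_pos h2]
          rw [List.set_comm _ _ (Nat.ne_of_lt ha), List.set_comm _ _ haj]
          exact ih (i+1) _ s' a v (Nat.lt_succ_of_lt ha) hs'
      · simp only [matchPass, if_neg h1, if_neg h2]
        exact ih (i+1) p s a v (Nat.lt_succ_of_lt ha) hs

-- The interleaved three-stack scan equals the three single-type passes in sequence,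
-- for any start index and stacks of earlier, pairwise disjoint indices.
theorem goA_eq_passes (cs : List Char) : ∀ (i : Nat) (p : List Int)
    (s1 s2 s3 : List Nat),
    (∀ x ∈ s1, x < i) → (∀ x ∈ s2, x < i) → (∀ x ∈ s3, x < i) →
    (∀ x ∈ s2, x ∉ s1) → (∀ x ∈ s3, x ∉ s1) → (∀ x ∈ s3, x ∉ s2) →
    goA cs i p s1 s2 s3 =
      matchPass '{' '}' cs i (matchPass '[' ']' cs i (matchPass '(' ')' cs i p s1) s2) s3 := by
  induction cs with
  | nil => intro i p s1 s2 s3 _ _ _ _ _ _; simp [goA, matchPass]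
  | cons ch cs ih =>
    intro i p s1 s2 s3 h1 h2 h3 d21 d31 d32
    by_cases e1 : ch = '('
    · subst e1
      simp only [goA, matchPass, reduceIte, Char.reduceEq]
      exact ih (i+1) p (i :: s1) s2 s3 (pvConsLt h1) (pvTailLt h2) (pvTailLt h3)
        (pvNotMemCons h2 d21) (pvNotMemCons h3 d31) d32
    · by_cases e2 : ch = '['
      · subst e2
        simp only [goA, matchPass, reduceIte, Char.reduceEq]
        exact ih (i+1) p s1 (i :: s2) s3 (pvTailLt h1) (pvConsLt h2) (pvTailLt h3)
          (pvConsNotMem (pvSelfNotMem h1) d21) d31 (pvNotMemCons h3 d32)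
      · by_cases e3 : ch = '{'
        · subst e3
          simp only [goA, matchPass, reduceIte, Char.reduceEq]
          exact ih (i+1) p s1 s2 (i :: s3) (pvTailLt h1) (pvTailLt h2) (pvConsLt h3)
            d21 (pvConsNotMem (pvSelfNotMem h1) d31) (pvConsNotMem (pvSelfNotMem h2) d32)
        · by_cases e4 : ch = ')'
          · subst e4
            cases s1 with
            | nil =>
              simp only [goA, matchPass, reduceIte, Char.reduceEq]
              exact ih (i+1) p [] s2 s3 (by simp) (pvTailLt h2) (pvTailLt h3)
                (by simp) (by simp) d32
            | cons j s' =>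
              simp only [goA, matchPass, reduceIte, Char.reduceEq]
              exact ih (i+1) ((p.set i (j : Int)).set j (i : Int)) s' s2 s3
                (fun x hx => Nat.lt_succ_of_lt (h1 x (List.mem_cons_of_mem _ hx)))
                (pvTailLt h2) (pvTailLt h3)
                (fun x hx hc => d21 x hx (List.mem_cons_of_mem _ hc))
                (fun x hx hc => d31 x hx (List.mem_cons_of_mem _ hc))
                d32
          · by_cases e5 : ch = ']'
            · subst e5
              cases s2 with
              | nil =>
                simp only [goA, matchPass, reduceIte, Char.reduceEq]
                exact ih (i+1) p s1 [] s3 (pvTailLt h1) (by simp) (pvTailLt h3)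
                  (by simp) d31 (by simp)
              | cons j s' =>
                have hj : j < i := h2 j (List.mem_cons_self ..)
                have hjs1 : j ∉ s1 := d21 j (List.mem_cons_self ..)
                simp only [goA, matchPass, reduceIte, Char.reduceEq]
                rw [ih (i+1) ((p.set i (j : Int)).set j (i : Int)) s1 s' s3 (pvTailLt h1)
                     (fun x hx => Nat.lt_succ_of_lt (h2 x (List.mem_cons_of_mem _ hx)))
                     (pvTailLt h3)
                     (fun x hx => d21 x (List.mem_cons_of_mem _ hx))
                     d31
                     (fun x hx hc => d32 x hx (List.mem_cons_of_mem _ hc))]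
                rw [matchPass_set_comm '(' ')' cs (i+1) (p.set i (j : Int)) s1 j (i : Int)
                      (Nat.lt_succ_of_lt hj) hjs1,
                    matchPass_set_comm '(' ')' cs (i+1) p s1 i (j : Int)
                      (Nat.lt_succ_self i) (pvSelfNotMem h1)]
            · by_cases e6 : ch = '}'
              · subst e6
                cases s3 with
                | nil =>
                  simp only [goA, matchPass, reduceIte, Char.reduceEq]
                  exact ih (i+1) p s1 s2 [] (pvTailLt h1) (pvTailLt h2) (by simp)
                    d21 (by simp) (by simp)
                | cons j s' =>
                  have hj : j < i := h3 j (List.mem_cons_self ..)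
                  have hjs1 : j ∉ s1 := d31 j (List.mem_cons_self ..)
                  have hjs2 : j ∉ s2 := d32 j (List.mem_cons_self ..)
                  simp only [goA, matchPass, reduceIte, Char.reduceEq]
                  rw [ih (i+1) ((p.set i (j : Int)).set j (i : Int)) s1 s2 s' (pvTailLt h1)
                       (pvTailLt h2)
                       (fun x hx => Nat.lt_succ_of_lt (h3 x (List.mem_cons_of_mem _ hx)))
                       d21
                       (fun x hx => d31 x (List.mem_cons_of_mem _ hx))
                       (fun x hx => d32 x (List.mem_cons_of_mem _ hx))]
                  rw [matchPass_set_comm '(' ')' cs (i+1) (p.set i (j : Int)) s1 j (i : Int)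
                        (Nat.lt_succ_of_lt hj) hjs1,
                      matchPass_set_comm '(' ')' cs (i+1) p s1 i (j : Int)
                        (Nat.lt_succ_self i) (pvSelfNotMem h1)]
                  rw [matchPass_set_comm '[' ']' cs (i+1)
                        ((matchPass '(' ')' cs (i+1) p s1).set i (j : Int)) s2 j (i : Int)
                        (Nat.lt_succ_of_lt hj) hjs2,
                      matchPass_set_comm '[' ']' cs (i+1)
                        (matchPass '(' ')' cs (i+1) p s1) s2 i (j : Int)
                        (Nat.lt_succ_self i) (pvSelfNotMem h2)]
              · simp only [goA, matchPass, if_neg e1, if_neg e2, if_neg e3, if_neg e4,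
                  if_neg e5, if_neg e6]
                exact ih (i+1) p s1 s2 s3 (pvTailLt h1) (pvTailLt h2) (pvTailLt h3) d21 d31 d32

-- ===== VERDICT (by name: the statement is the Claim_ definition above) =====
theorem dotbracket_to_pairs_py_spec : Claim_equal_dotbracket_to_pairs_py := by
  intro db _
  unfold Spec_dotbracket_to_pairs_py dotbracket_to_pairs_py dotbracket_to_pairs_py_alt
  exact goA_eq_passes db.toList 0 _ [] [] [] (by simp) (by simp) (by simp)
    (by simp) (by simp) (by simp)
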